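-- pv_equiv track=rewrite | github.com/ellisgl/TMEPT | tools/tmept_asm.py | split_operands
-- ===== SOURCE A (Python) =====
-- def split_operands(operand_str):
--     """Split comma-separated operands, respecting parentheses."""
--     parts = []
--     depth = 0
--     cur   = ''
--     for ch in operand_str:
--         if ch == '(':
--             depth += 1
--             cur += ch
--         elif ch == ')':
--             depth -= 1
--             cur += ch
--         elif ch == ',' and depth == 0:
--             parts.append(cur.strip())
--             cur = ''
--         else:
--             cur += ch
--     if cur.strip():
--         parts.append(cur.strip())
--     return parts
-- ===== SOURCE B (Python) =====
-- def split_operands(operand_str):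
--     """Split comma-separated operands, respecting parentheses.
--
--     B: split on every comma first, then regroup the raw tokens by running
--     net-parenthesis balance instead of scanning character by character."""
--     tokens = operand_str.split(',')
--     parts = []
--     group = []
--     bal = 0
--     for tok in tokens[:-1]:
--         bal += tok.count('(') - tok.count(')')
--         group.append(tok)
--         if bal == 0:
--             parts.append(','.join(group).strip())
--             group = []
--     group.append(tokens[-1])
--     tail = ','.join(group).strip()
--     if tail:
--         parts.append(tail)
--     return parts
-- ===== Notes on version B (the rewrite author's own statement) =====
-- stated objective: faster
-- what changed: B replaces A's character-by-character scan (building the current group one char at a time) by one str.split on commas followed by a token-level regrouping pass driven by the running net parenthesis balance of each token.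
import Mathlib
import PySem

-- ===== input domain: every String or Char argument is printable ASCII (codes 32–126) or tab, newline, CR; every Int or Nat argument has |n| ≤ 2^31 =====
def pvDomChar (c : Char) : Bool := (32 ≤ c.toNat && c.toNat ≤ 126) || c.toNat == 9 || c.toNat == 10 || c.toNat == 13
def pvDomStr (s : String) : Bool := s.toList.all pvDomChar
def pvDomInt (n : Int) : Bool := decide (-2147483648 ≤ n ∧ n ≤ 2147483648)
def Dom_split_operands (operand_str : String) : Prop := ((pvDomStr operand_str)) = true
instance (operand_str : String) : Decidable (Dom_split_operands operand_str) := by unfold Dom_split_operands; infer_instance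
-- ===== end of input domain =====

-- B splits the string on every comma first and regroups the raw tokens by running net
-- parenthesis balance, instead of A's character-by-character scan (alternative, same cost).

-- ===== PORT A =====
-- loop state: (parts, depth, cur)
def splitA_step (st : List String × Int × List Char) (ch : Char) : List String × Int × List Char :=
  match st with
  | (parts, depth, cur) =>
    if ch = '(' then (parts, depth + 1, cur ++ [ch])
    else if ch = ')' then (parts, depth - 1, cur ++ [ch])
    else if ch = ',' ∧ depth = 0 then (parts ++ [String.ofList (PySem.Chars.strip cur)], depth, ([] : List Char))
    else (parts, depth, cur ++ [ch])

def split_operands (operand_str : String) : List String :=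
  let st := operand_str.toList.foldl splitA_step ([], 0, [])
  if PySem.Chars.strip st.2.2 ≠ [] then st.1 ++ [String.ofList (PySem.Chars.strip st.2.2)] else st.1

-- ===== PORT B =====
-- net parenthesis balance of one raw token, open count minus close count (as in Source B)
def pvNetc (t : List Char) : Int :=
  (PySem.Chars.count t ['('] : Int) - (PySem.Chars.count t [')'] : Int)

-- loop state: (parts, group, bal)
def splitB_step (st : List String × List (List Char) × Int) (tok : List Char) : List String × List (List Char) × Int :=
  match st with
  | (parts, group, bal) =>
    let bal' := bal + pvNetc tok
    let group' := group ++ [tok]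
    if bal' = 0 then
      (parts ++ [String.ofList (PySem.Chars.strip (PySem.Chars.join [','] group'))], ([] : List (List Char)), bal')
    else (parts, group', bal')

def split_operands_alt (operand_str : String) : List String :=
  let tokens := PySem.Chars.splitOn operand_str.toList [',']
  let st := tokens.dropLast.foldl splitB_step ([], [], 0)
  let tail := PySem.Chars.strip (PySem.Chars.join [','] (st.2.1 ++ [tokens.getLastD []]))
  if tail ≠ [] then st.1 ++ [String.ofList tail] else st.1

-- ===== PRECONDITION & SPEC =====
def Spec_split_operands (operand_str : String) (out : List String) : Prop := out = split_operands_alt operand_str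
instance (operand_str : String) (out : List String) : Decidable (Spec_split_operands operand_str out) := by unfold Spec_split_operands; infer_instance

-- ===== CLAIM (what is proved, stated in full; the proofs are below) =====
def Claim_equal_split_operands : Prop := ∀ (operand_str : String), Dom_split_operands operand_str → Spec_split_operands operand_str (split_operands operand_str)

-- ===== LEMMAS AND PROOFS =====

-- A as a structural recursion on the character list
def coreA : List Char → List String → Int → List Char → List String
  | [], parts, _, cur =>
      if PySem.Chars.strip cur ≠ [] then parts ++ [String.ofList (PySem.Chars.strip cur)] else parts
  | c :: cs, parts, d, cur =>
      if c = '(' then coreA cs parts (d + 1) (cur ++ [c])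
      else if c = ')' then coreA cs parts (d - 1) (cur ++ [c])
      else if c = ',' ∧ d = 0 then coreA cs (parts ++ [String.ofList (PySem.Chars.strip cur)]) d []
      else coreA cs parts d (cur ++ [c])

-- splitOn on the single-character separator ',' as a structural recursion
def mySplit : List Char → List (List Char)
  | [] => [[]]
  | c :: cs => if c = ',' then [] :: mySplit cs else (mySplit cs).modifyHead (c :: ·)

-- B as a structural recursion on the token list (last token special)
def gB : List (List Char) → List String → List (List Char) → Int → List String
  | [], parts, _, _ => parts
  | [t], parts, group, _ =>
      let tail := PySem.Chars.strip (PySem.Chars.join [','] (group ++ [t]))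
      if tail ≠ [] then parts ++ [String.ofList tail] else parts
  | t :: rest, parts, group, bal =>
      let bal' := bal + pvNetc t
      if bal' = 0 then
        gB rest (parts ++ [String.ofList (PySem.Chars.strip (PySem.Chars.join [','] (group ++ [t])))]) [] bal'
      else gB rest parts (group ++ [t]) bal'

theorem mySplit_ne_nil (cs : List Char) : mySplit cs ≠ [] := by
  induction cs with
  | nil => simp [mySplit]
  | cons c cs ih =>
    simp only [mySplit]
    split
    · simp
    · cases h : mySplit cs with
      | nil => exact absurd h ih
      | cons a l => simp [List.modifyHead]

theorem count_go_single : ∀ (l : List Char) (a : Char) (fuel : Nat) (acc : Nat),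
    l.length ≤ fuel → PySem.Chars.count.go [a] fuel l acc = acc + l.count a := by
  intro l
  induction l with
  | nil => intro a fuel acc h; cases fuel <;> simp [PySem.Chars.count.go]
  | cons c t ih =>
    intro a fuel acc h
    cases fuel with
    | zero => simp at h
    | succ f =>
      simp only [PySem.Chars.count.go]
      by_cases hac : a = c
      · subst hac
        simp only [List.isPrefixOf, if_pos]
        rw [if_pos (by simp)]
        rw [show List.drop [a].length (a :: t) = t by simp]
        rw [ih a f (acc+1) (by simpa using h)]
        simp [List.count_cons]
        omega
      · rw [if_neg (by simp [List.isPrefixOf]; exact fun hh => hac hh)]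
        rw [ih a f acc (by simpa using Nat.le_of_succ_le_succ h)]
        simp [List.count_cons, hac]
        intro hca; exact absurd hca.symm hac

theorem count_single (l : List Char) (a : Char) : PySem.Chars.count l [a] = l.count a := by
  simp [PySem.Chars.count, count_go_single l a l.length 0 le_rfl]

theorem splitOn_go_eq : ∀ (cs : List Char) (fuel : Nat) (cur : List Char) (acc : List (List Char)),
    cs.length < fuel →
    PySem.Chars.splitOn.go [','] fuel cs cur acc
      = acc.reverse ++ (mySplit cs).modifyHead (cur.reverse ++ ·) := by
  intro cs
  induction cs with
  | nil =>
    intro fuel cur acc h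
    cases fuel with
    | zero => omega
    | succ f => simp [PySem.Chars.splitOn.go, mySplit, List.modifyHead]
  | cons c t ih =>
    intro fuel cur acc h
    cases fuel with
    | zero => omega
    | succ f =>
      simp only [PySem.Chars.splitOn.go]
      by_cases hc : c = ','
      · subst hc
        rw [if_pos (by simp [List.isPrefixOf])]
        rw [show List.drop [','].length (',' :: t) = t by simp]
        rw [ih f [] (List.reverse cur :: acc) (by simpa using h)]
        simp only [mySplit, if_pos rfl, List.reverse_cons, List.append_assoc,
          List.modifyHead, List.reverse_nil, List.nil_append, List.singleton_append]
        cases hms : mySplit t <;> simp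
      · rw [if_neg (by simp [List.isPrefixOf]; exact fun hh => hc hh.symm)]
        rw [ih f (c :: cur) acc (by simpa using Nat.lt_of_succ_lt_succ h)]
        simp only [mySplit, if_neg hc]
        cases hms : mySplit t with
        | nil => exact absurd hms (mySplit_ne_nil t)
        | cons a l => simp [List.modifyHead]

theorem splitOn_eq_mySplit (cs : List Char) : PySem.Chars.splitOn cs [','] = mySplit cs := by
  rw [PySem.Chars.splitOn, splitOn_go_eq cs (cs.length + 1) [] [] (by omega)]
  cases h : mySplit cs with
  | nil => exact absurd h (mySplit_ne_nil cs)
  | cons a l => simp [List.modifyHead]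

theorem pvNetc_nil : pvNetc [] = 0 := by decide

theorem pvNetc_append_char (p : List Char) (c : Char) :
    pvNetc (p ++ [c]) = pvNetc p + (if c = '(' then 1 else if c = ')' then -1 else 0) := by
  simp only [pvNetc, count_single, List.count_append, List.count_singleton]
  split_ifs with h1 h2 <;> simp_all <;> push_cast <;> ring_nf

theorem join_app_last : ∀ (g : List (List Char)) (p q : List Char),
    PySem.Chars.join [','] (g ++ [p]) ++ q = PySem.Chars.join [','] (g ++ [p ++ q]) := by
  intro g
  induction g with
  | nil => intro p q; simp [PySem.Chars.join_singleton]
  | cons a g ih =>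
    intro p q
    cases g with
    | nil =>
      have h1 := PySem.Chars.join_cons_cons [','] a p []
      have h2 := PySem.Chars.join_cons_cons [','] a (p ++ q) []
      simp only [List.nil_append, List.cons_append] at *
      rw [h1, h2]
      simp [PySem.Chars.join_singleton]
    | cons b g' =>
      have h1 := PySem.Chars.join_cons_cons [','] a b (g' ++ [p])
      have h2 := PySem.Chars.join_cons_cons [','] a b (g' ++ [p ++ q])
      simp only [List.cons_append] at *
      rw [h1, h2, ← ih p q]
      simp

theorem join_app_nil : ∀ (g : List (List Char)) (p : List Char),
    PySem.Chars.join [','] (g ++ [p] ++ [[]]) = PySem.Chars.join [','] (g ++ [p]) ++ [','] := by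
  intro g
  induction g with
  | nil =>
    intro p
    have h1 := PySem.Chars.join_cons_cons [','] p [] []
    simp only [List.nil_append, List.cons_append] at *
    rw [h1]
    simp [PySem.Chars.join_singleton]
  | cons a g ih =>
    intro p
    cases g with
    | nil =>
      have h1 := PySem.Chars.join_cons_cons [','] a p [[]]
      have h2 := PySem.Chars.join_cons_cons [','] p [] []
      have h3 := PySem.Chars.join_cons_cons [','] a p []
      simp only [List.nil_append, List.cons_append] at *
      rw [h1, h2, h3]
      simp [PySem.Chars.join_singleton]
    | cons b g' =>
      have h1 := PySem.Chars.join_cons_cons [','] a b (g' ++ [p] ++ [[]])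
      have h2 := PySem.Chars.join_cons_cons [','] a b (g' ++ [p])
      simp only [List.cons_append] at *
      rw [h1, h2, ih p]
      simp

theorem foldA_eq_coreA : ∀ (cs : List Char) (parts : List String) (d : Int) (cur : List Char),
    (let st := cs.foldl splitA_step (parts, d, cur);
     if PySem.Chars.strip st.2.2 ≠ [] then st.1 ++ [String.ofList (PySem.Chars.strip st.2.2)] else st.1)
    = coreA cs parts d cur := by
  intro cs
  induction cs with
  | nil => intro parts d cur; simp [coreA]
  | cons c cs ih =>
    intro parts d cur
    simp only [List.foldl_cons]
    by_cases h1 : c = '('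
    · simp only [splitA_step, if_pos h1, coreA]
      exact ih parts (d + 1) (cur ++ [c])
    · by_cases h2 : c = ')'
      · simp only [splitA_step, if_neg h1, if_pos h2, coreA]
        exact ih parts (d - 1) (cur ++ [c])
      · by_cases h3 : c = ',' ∧ d = 0
        · simp only [splitA_step, if_neg h1, if_neg h2, if_pos h3, coreA]
          exact ih (parts ++ [String.ofList (PySem.Chars.strip cur)]) d []
        · simp only [splitA_step, if_neg h1, if_neg h2, if_neg h3, coreA]
          exact ih parts d (cur ++ [c])

theorem foldB_eq_gB : ∀ (tokens : List (List Char)) (parts : List String) (group : List (List Char)) (bal : Int),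
    tokens ≠ [] →
    (let st := tokens.dropLast.foldl splitB_step (parts, group, bal);
     let tail := PySem.Chars.strip (PySem.Chars.join [','] (st.2.1 ++ [tokens.getLastD []]));
     if tail ≠ [] then st.1 ++ [String.ofList tail] else st.1)
    = gB tokens parts group bal := by
  intro tokens
  induction tokens with
  | nil => intro _ _ _ h; exact absurd rfl h
  | cons t rest ih =>
    intro parts group bal _
    cases rest with
    | nil => simp [gB]
    | cons t' rest' =>
      have hd : (t :: t' :: rest').dropLast = t :: (t' :: rest').dropLast := rfl
      have hl : (t :: t' :: rest').getLastD [] = (t' :: rest').getLastD [] := by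
        simp [List.getLastD]
      rw [hd, hl]
      simp only [List.foldl_cons, splitB_step]
      by_cases hb : bal + pvNetc t = 0
      · simp only [gB, if_pos hb]
        exact ih _ [] (bal + pvNetc t) (by simp)
      · simp only [gB, if_neg hb]
        exact ih parts (group ++ [t]) (bal + pvNetc t) (by simp)

theorem gB_eq_coreA : ∀ (cs p : List Char) (group : List (List Char)) (parts : List String) (bal : Int),
    gB ((mySplit cs).modifyHead (p ++ ·)) parts group bal
      = coreA cs parts (bal + pvNetc p) (PySem.Chars.join [','] (group ++ [p])) := by
  intro cs
  induction cs with
  | nil =>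
    intro p group parts bal
    simp [mySplit, List.modifyHead, gB, coreA]
  | cons c cs ih =>
    intro p group parts bal
    obtain ⟨t, ts, hms⟩ : ∃ t ts, mySplit cs = t :: ts := by
      cases h : mySplit cs with
      | nil => exact absurd h (mySplit_ne_nil cs)
      | cons a l => exact ⟨a, l, rfl⟩
    have hid : t :: ts = (mySplit cs).modifyHead ([] ++ ·) := by
      rw [hms]; simp [List.modifyHead]
    by_cases hc : c = ','
    · subst hc
      have hsplit : List.modifyHead (p ++ ·) (mySplit (',' :: cs)) = p :: t :: ts := by
        simp [mySplit, hms, List.modifyHead]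
      rw [hsplit]
      have hcore : coreA (',' :: cs) parts (bal + pvNetc p) (PySem.Chars.join [','] (group ++ [p]))
          = if bal + pvNetc p = 0 then
              coreA cs (parts ++ [String.ofList (PySem.Chars.strip (PySem.Chars.join [','] (group ++ [p])))])
                (bal + pvNetc p) []
            else coreA cs parts (bal + pvNetc p) (PySem.Chars.join [','] (group ++ [p]) ++ [',']) := by
        simp [coreA]
      rw [hcore]
      simp only [gB]
      by_cases hb : bal + pvNetc p = 0
      · rw [if_pos hb, if_pos hb, hid, ih [] [] _ (bal + pvNetc p)]
        simp [pvNetc_nil, PySem.Chars.join_singleton]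
      · rw [if_neg hb, if_neg hb, hid, ih [] (group ++ [p]) parts (bal + pvNetc p), pvNetc_nil]
        have := join_app_nil group p
        rw [show (group ++ [p]) ++ [([] : List Char)] = group ++ [p] ++ [[]] by simp] at this
        rw [this]
        simp
    · have hsplit : List.modifyHead (p ++ ·) (mySplit (c :: cs))
          = List.modifyHead ((p ++ [c]) ++ ·) (mySplit cs) := by
        simp [mySplit, if_neg hc, hms, List.modifyHead]
      rw [hsplit, ih (p ++ [c]) group parts bal, pvNetc_append_char]
      by_cases h1 : c = '('
      · subst h1
        simp only [coreA, if_pos rfl]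
        rw [join_app_last group p ['(']]
        norm_num
        ring_nf
      · by_cases h2 : c = ')'
        · subst h2
          simp only [coreA, if_neg (by decide : ¬(')' = '(')), if_pos rfl]
          rw [join_app_last group p [')']]
          norm_num
          ring_nf
        · simp only [coreA, if_neg h1, if_neg h2, if_neg (fun hh : c = ',' ∧ bal + pvNetc p = 0 => hc hh.1)]
          rw [join_app_last group p [c]]
          simp [h1, h2]

-- ===== VERDICT (by name: the statement is the Claim_ definition above) =====
theorem split_operands_spec : Claim_equal_split_operands := by
  intro s _hd
  unfold Spec_split_operands
  have hA : split_operands s = coreA s.toList [] 0 [] := foldA_eq_coreA s.toList [] 0 []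
  have hne : PySem.Chars.splitOn s.toList [','] ≠ [] := by
    rw [splitOn_eq_mySplit]; exact mySplit_ne_nil s.toList
  have hB : split_operands_alt s = gB (PySem.Chars.splitOn s.toList [',']) [] [] 0 :=
    foldB_eq_gB (PySem.Chars.splitOn s.toList [',']) [] [] 0 hne
  rw [hA, hB, splitOn_eq_mySplit]
  have hid : mySplit s.toList = (mySplit s.toList).modifyHead (([] : List Char) ++ ·) := by
    cases h : mySplit s.toList with
    | nil => exact absurd h (mySplit_ne_nil s.toList)
    | cons a l => simp [List.modifyHead]
  rw [hid, gB_eq_coreA s.toList [] [] [] 0]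
  simp [pvNetc_nil, PySem.Chars.join_singleton]
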